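-- pv_equiv track=rewrite | github.com/AliZainoul/_Python_Tutorial | examples/number_representations/number_representations.py | power_of_two_decomposition
-- ===== SOURCE A (Python) =====
-- def power_of_two_decomposition(num: int) -> list:
--     """
--     Decompose a number into sum of powers of 2.
--
--     :param num: The number to decompose
--     :return: List of powers of 2 that sum to the number
--     """
--     powers = []
--     i = 0
--     while num:
--         if num & 1:
--             powers.append(2 ** i)
--         num >>= 1
--         i += 1
--     return powers
-- ===== SOURCE B (Python) =====
-- def power_of_two_decomposition(num: int) -> list:
--     """
--     Decompose a number into sum of powers of 2.
--
--     Top-down: repeatedly strip the HIGHEST power of two (via bit_length)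
--     and build the list back-to-front by prepending, so it comes out ascending.
--     """
--     powers = []
--     while num:
--         p = 1 << (num.bit_length() - 1)
--         powers = [p] + powers
--         num -= p
--     return powers
-- ===== Notes on version B (the rewrite author's own statement) =====
-- stated objective: alternative
-- what changed: A scans every bit position from the LSB with an index counter and appends 2**i when the bit is set; B instead repeatedly strips the highest set bit (1 << (bit_length-1)), subtracts it, and builds the list back-to-front by prepending, so only set bits are visited and no position counter or parity test is needed.
import Mathlib
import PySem

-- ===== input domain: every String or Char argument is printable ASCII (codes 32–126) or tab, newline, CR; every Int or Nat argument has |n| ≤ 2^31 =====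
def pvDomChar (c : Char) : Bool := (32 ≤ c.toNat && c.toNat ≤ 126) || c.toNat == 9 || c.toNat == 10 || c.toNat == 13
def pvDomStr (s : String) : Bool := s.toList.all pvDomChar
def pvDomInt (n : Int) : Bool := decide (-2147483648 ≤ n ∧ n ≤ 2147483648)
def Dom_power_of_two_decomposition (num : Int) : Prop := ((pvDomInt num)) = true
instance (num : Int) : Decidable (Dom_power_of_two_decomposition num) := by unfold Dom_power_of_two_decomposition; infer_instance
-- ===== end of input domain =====

-- B strips the highest set bit (1 << (bit_length-1)) and prepends, instead of A's
-- LSB-to-MSB scan with an index counter; same return value, different traversal.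

-- ===== PORT A =====
-- while num: if num & 1: powers.append(2**i); num >>= 1; i += 1
-- (guard 'num ≤ 0' makes the recursion total; Python diverges for num < 0, excluded by Pre_)
def pvALoop (num : Int) (i : Nat) (powers : List Int) : List Int :=
  if _h : num ≤ 0 then powers
  else
    pvALoop (num >>> (1:Nat))
      (i + 1)
      (if PySem.Int.band num 1 = 1 then powers ++ [(2 : Int) ^ i] else powers)
termination_by num.toNat
decreasing_by
  have h1 : num >>> (1:Nat) = num / 2 := by rw [Int.shiftRight_eq_div_pow]; norm_num
  rw [h1]; omega

def power_of_two_decomposition (num : Int) : List Int :=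
  pvALoop num 0 []

-- ===== PORT B =====
-- while num: p = 1 << (num.bit_length() - 1); powers = [p] + powers; num -= p
def pvBLoop (num : Int) (powers : List Int) : List Int :=
  if _h : num ≤ 0 then powers
  else
    let p : Int := (1 : Int) <<< (PySem.Int.bitLength num - 1)
    pvBLoop (num - p) ([p] ++ powers)
termination_by num.toNat
decreasing_by
  have h2 : (0:Int) < (1 : Int) <<< (PySem.Int.bitLength num - 1) := by
    rw [Int.shiftLeft_eq]; positivity
  omega

def power_of_two_decomposition_alt (num : Int) : List Int :=
  pvBLoop num []

-- ===== PRECONDITION & SPEC =====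
-- Pre_ excludes num < 0: there Python's A (and B) loop forever (num >>= 1 stalls at -1), so A never returns.
def Pre_power_of_two_decomposition (num : Int) : Prop := 0 ≤ num
instance (num : Int) : Decidable (Pre_power_of_two_decomposition num) := by unfold Pre_power_of_two_decomposition; infer_instance
def pvWitness_power_of_two_decomposition : Int := (13)

def Spec_power_of_two_decomposition (num : Int) (out : List Int) : Prop := out = power_of_two_decomposition_alt num
instance (num : Int) (out : List Int) : Decidable (Spec_power_of_two_decomposition num out) := by unfold Spec_power_of_two_decomposition; infer_instance

-- ===== CLAIM (what is proved, stated in full; the proofs are below) =====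
def Claim_equal_power_of_two_decomposition : Prop := ∀ (num : Int), Dom_power_of_two_decomposition num → Pre_power_of_two_decomposition num → Spec_power_of_two_decomposition num (power_of_two_decomposition num)


-- ===== LEMMAS AND PROOFS =====

-- n >> 1 is halving
theorem pvShiftr1 (n : Int) : n >>> (1:Nat) = n / 2 := by
  rw [Int.shiftRight_eq_div_pow]; norm_num

-- num & 1 is num % 2
theorem pvBandOne (n : Int) : PySem.Int.band n 1 = n % 2 := by
  rw [PySem.Int.band_one, PySem.Int.mod_eq_emod_of_pos (by omega : (0:Int) < 2)]

theorem pvBitLenHalf (n : Int) (h : 0 < n) :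
    PySem.Int.bitLength n = PySem.Int.bitLength (n / 2) + 1 := by
  rw [PySem.Int.bitLength_of_pos h,
    PySem.Int.floordiv_eq_ediv_of_pos (by omega : (0:Int) < 2)]

theorem pvBitLenPos (n : Int) (h : 0 < n) : 1 ≤ PySem.Int.bitLength n := by
  rw [pvBitLenHalf n h]; omega

theorem pvTwoPowLe (n : Int) (h : 0 < n) :
    (2:Int) ^ (PySem.Int.bitLength n - 1) ≤ n := by
  have h1 := PySem.Int.two_pow_bitLength_le n (by omega)
  have h2 : ((2 ^ (PySem.Int.bitLength n - 1) : Nat) : Int) ≤ (n.natAbs : Int) := by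
    exact_mod_cast h1
  rw [Int.natAbs_of_nonneg (by omega)] at h2
  exact_mod_cast h2

-- the accumulator of A's loop only ever receives appends
theorem pvALoop_append (n : Int) (i : Nat) (powers : List Int) :
    pvALoop n i powers = powers ++ pvALoop n i [] := by
  by_cases h : n ≤ 0
  · conv_lhs => rw [pvALoop]
    conv_rhs => rw [pvALoop]
    simp [h]
  · conv_lhs => rw [pvALoop]
    conv_rhs => rw [pvALoop]
    simp only [dif_neg h]
    rw [pvALoop_append (n >>> (1:Nat)) (i+1)
          (if PySem.Int.band n 1 = 1 then powers ++ [(2:Int) ^ i] else powers),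
        pvALoop_append (n >>> (1:Nat)) (i+1)
          (if PySem.Int.band n 1 = 1 then ([]:List Int) ++ [(2:Int) ^ i] else [])]
    split_ifs <;> simp
termination_by n.toNat
decreasing_by all_goals (rw [pvShiftr1]; omega)

-- bumping the position counter doubles every emitted power
theorem pvALoop_succ (n : Int) (i : Nat) :
    pvALoop n (i+1) [] = (pvALoop n i []).map (· * 2) := by
  by_cases h : n ≤ 0
  · conv_lhs => rw [pvALoop]
    conv_rhs => rw [pvALoop]
    simp [h]
  · conv_lhs => rw [pvALoop]
    conv_rhs => rw [pvALoop]
    simp only [dif_neg h]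
    rw [pvALoop_append, pvALoop_append (n >>> (1:Nat)) (i+1),
        pvALoop_succ (n >>> (1:Nat)) (i+1)]
    split_ifs <;> simp [pow_succ]
termination_by n.toNat
decreasing_by all_goals (rw [pvShiftr1]; omega)

theorem pvACore_zero : pvALoop 0 0 [] = [] := by
  rw [pvALoop]; simp

theorem pvACore_even (k : Int) (hk : 0 ≤ k) :
    pvALoop (2*k) 0 [] = (pvALoop k 0 []).map (· * 2) := by
  rcases eq_or_lt_of_le hk with h0 | h0
  · rw [← h0]
    norm_num [pvACore_zero]
  · rw [pvALoop]
    simp only [dif_neg (by omega : ¬ 2*k ≤ 0)]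
    have hb : PySem.Int.band (2*k) 1 = 0 := by rw [pvBandOne]; omega
    have hs : (2*k) >>> (1:Nat) = k := by rw [pvShiftr1]; omega
    rw [hb, hs]
    simp only [if_neg (by omega : ¬ (0:Int) = 1)]
    exact pvALoop_succ k 0

theorem pvACore_odd (k : Int) (hk : 0 ≤ k) :
    pvALoop (2*k+1) 0 [] = 1 :: (pvALoop k 0 []).map (· * 2) := by
  rw [pvALoop]
  simp only [dif_neg (by omega : ¬ 2*k+1 ≤ 0)]
  have hb : PySem.Int.band (2*k+1) 1 = 1 := by rw [pvBandOne]; omega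
  have hs : (2*k+1) >>> (1:Nat) = k := by rw [pvShiftr1]; omega
  rw [hb, hs]
  rw [pvALoop_append, pvALoop_succ k 0]
  simp

-- B's loop only ever prepends to the accumulator
theorem pvBLoop_append (n : Int) (powers : List Int) :
    pvBLoop n powers = pvBLoop n [] ++ powers := by
  by_cases h : n ≤ 0
  · conv_lhs => rw [pvBLoop]
    conv_rhs => rw [pvBLoop]
    simp [h]
  · conv_lhs => rw [pvBLoop]
    conv_rhs => rw [pvBLoop]
    simp only [dif_neg h]
    rw [pvBLoop_append (n - (1:Int) <<< (PySem.Int.bitLength n - 1))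
          ([(1:Int) <<< (PySem.Int.bitLength n - 1)] ++ powers),
        pvBLoop_append (n - (1:Int) <<< (PySem.Int.bitLength n - 1))
          ([(1:Int) <<< (PySem.Int.bitLength n - 1)] ++ [])]
    simp
termination_by n.toNat
decreasing_by all_goals
  (have h2 : (0:Int) < (1 : Int) <<< (PySem.Int.bitLength n - 1) := by
    rw [Int.shiftLeft_eq]; positivity
   omega)

-- A's list for n equals A's list for n minus its highest set bit, with that bit appended
theorem pvHighbit (n : Int) (hn : 0 < n) :
    pvALoop n 0 [] =
      pvALoop (n - 2 ^ (PySem.Int.bitLength n - 1)) 0 []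
        ++ [(2:Int) ^ (PySem.Int.bitLength n - 1)] := by
  rcases eq_or_lt_of_le (by omega : (1:Int) ≤ n) with h1 | h1
  · -- n = 1
    rw [← h1]
    have hb : PySem.Int.bitLength (1:Int) = 1 := by decide
    rw [hb]
    norm_num
    have : pvALoop 1 0 [] = 1 :: (pvALoop 0 0 []).map (· * 2) := by
      have := pvACore_odd 0 le_rfl; norm_num at this ⊢; exact this
    rw [this, pvACore_zero]; simp
  · -- n ≥ 2
    set k : Int := n / 2 with hkdef
    have hk1 : 1 ≤ k := by omega
    have hLk := pvBitLenPos k (by omega)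
    have hL : PySem.Int.bitLength n = PySem.Int.bitLength k + 1 := pvBitLenHalf n hn
    have hle : (2:Int) ^ (PySem.Int.bitLength k - 1) ≤ k := pvTwoPowLe k (by omega)
    have hIH := pvHighbit k (by omega)
    have hpow : (2:Int) ^ (PySem.Int.bitLength n - 1)
        = 2 ^ (PySem.Int.bitLength k - 1) * 2 := by
      rw [hL]
      have : PySem.Int.bitLength k + 1 - 1 = (PySem.Int.bitLength k - 1) + 1 := by omega
      rw [this, pow_succ]
    rcases (by omega : n % 2 = 0 ∨ n % 2 = 1) with hm | hm
    · -- n even: n = 2*k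
      have hn2 : n = 2 * k := by omega
      rw [hn2, pvACore_even k (by omega), hIH]
      have harg : 2 * k - 2 ^ (PySem.Int.bitLength (2*k) - 1)
          = 2 * (k - 2 ^ (PySem.Int.bitLength k - 1)) := by
        rw [← hn2, hpow, hn2]; ring
      rw [harg, pvACore_even (k - 2 ^ (PySem.Int.bitLength k - 1)) (by omega)]
      rw [← hn2, hpow]
      simp
    · -- n odd: n = 2*k+1
      have hn2 : n = 2 * k + 1 := by omega
      rw [hn2, pvACore_odd k (by omega), hIH]
      have harg : 2 * k + 1 - 2 ^ (PySem.Int.bitLength (2*k+1) - 1)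
          = 2 * (k - 2 ^ (PySem.Int.bitLength k - 1)) + 1 := by
        rw [← hn2, hpow, hn2]; ring
      rw [harg, pvACore_odd (k - 2 ^ (PySem.Int.bitLength k - 1)) (by omega)]
      rw [← hn2, hpow]
      simp
termination_by n.toNat
decreasing_by all_goals omega

-- main equivalence, peeling highest bits
theorem pvMain (n : Int) (hn : 0 ≤ n) : pvALoop n 0 [] = pvBLoop n [] := by
  rcases eq_or_lt_of_le hn with h0 | h0
  · rw [← h0, pvACore_zero, pvBLoop]; simp
  · have hle := pvTwoPowLe n h0
    have hsh : (1:Int) <<< (PySem.Int.bitLength n - 1)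
        = 2 ^ (PySem.Int.bitLength n - 1) := by
      rw [Int.shiftLeft_eq]; ring
    rw [pvBLoop]
    simp only [dif_neg (by omega : ¬ n ≤ 0)]
    rw [pvBLoop_append, hsh,
      ← pvMain (n - 2 ^ (PySem.Int.bitLength n - 1)) (by omega),
      pvHighbit n h0]
    simp
termination_by n.toNat
decreasing_by all_goals
  (have h2 : (0:Int) < (2:Int) ^ (PySem.Int.bitLength n - 1) := by positivity
   omega)

-- ===== VERDICT (by name: the statement is the Claim_ definition above) =====
theorem power_of_two_decomposition_spec : Claim_equal_power_of_two_decomposition := by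
  intro num _ hpre
  unfold Spec_power_of_two_decomposition power_of_two_decomposition power_of_two_decomposition_alt
  exact pvMain num hpre
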